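-- pv_equiv track=rewrite | github.com/krafft2/CSC439_FinalProject_EthanKrafft | SentimentAnalysis.py | create_BOW
-- ===== SOURCE A (Python) =====
-- def create_BOW(corpus: iter):
--     """This function is responsible for creating a bag-of-words used in the
--         naive bayes classifier later in the project. It returns a dictionary
--         form of a bag-of-words and a count of labels showing the number of
--         positive or negative reviews in a train/dev/test set.
--     """
--     bow_pos, bow_neg, label_count = {},{},{}
--     label_count[0] = 0
--     label_count[1] = 0
--     bag_of_words = {}
--     for sentence in corpus:
--         review = int(sentence[1])
--         label_count[review] += 1
--         for token in sentence[0]: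
--             if review == 0:
--                 if token not in bow_neg:
--                     bow_neg[token] = 1
--                 else:
--                     bow_neg[token] += 1
--             elif review == 1:
--                 if token not in bow_pos:
--                     bow_pos[token] = 1
--                 else:
--                     bow_pos[token] += 1
--
--     bag_of_words[0] = bow_neg
--     bag_of_words[1] = bow_pos
--     return bag_of_words, label_count
-- ===== SOURCE B (Python) =====
-- def create_BOW(corpus: iter):
--     """Two-pass rewrite: first partition tokens by label while counting labels,
--     then build each bag-of-words by counting the partitioned token lists."""
--     neg_tokens, pos_tokens = [], []
--     label_count = {0: 0, 1: 0}
--     for sentence in corpus: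
--         review = int(sentence[1])
--         label_count[review] += 1
--         if review == 0:
--             neg_tokens.extend(sentence[0])
--         else:
--             pos_tokens.extend(sentence[0])
--     bow_neg = {}
--     for token in neg_tokens:
--         bow_neg[token] = bow_neg.get(token, 0) + 1
--     bow_pos = {}
--     for token in pos_tokens:
--         bow_pos[token] = bow_pos.get(token, 0) + 1
--     return {0: bow_neg, 1: bow_pos}, label_count
-- ===== Notes on version B (the rewrite author's own statement) =====
-- stated objective: alternative
-- what changed: A counts tokens into two bags in one pass with per-token branching; B first partitions tokens into per-label lists (counting labels in the same pass) and then builds each bag by a separate counting pass over its token list.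
import Mathlib
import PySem

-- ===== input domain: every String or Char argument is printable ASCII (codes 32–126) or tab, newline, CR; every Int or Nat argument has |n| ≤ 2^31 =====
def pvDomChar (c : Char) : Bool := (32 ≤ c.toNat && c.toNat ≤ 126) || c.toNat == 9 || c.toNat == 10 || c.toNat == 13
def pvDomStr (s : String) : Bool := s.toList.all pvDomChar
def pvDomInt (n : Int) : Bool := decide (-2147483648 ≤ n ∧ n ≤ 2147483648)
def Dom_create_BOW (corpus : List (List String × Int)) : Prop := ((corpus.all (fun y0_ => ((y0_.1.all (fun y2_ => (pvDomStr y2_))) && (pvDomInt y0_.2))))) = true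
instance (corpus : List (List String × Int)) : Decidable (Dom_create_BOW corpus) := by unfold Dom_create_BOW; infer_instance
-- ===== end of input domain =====

-- B builds the same bags by partitioning tokens per label first, then counting each partition (alternative decomposition, same cost).

-- ===== PORT A =====
-- one pass: per sentence bump label_count and count each token into bow_neg/bow_pos by branching on the label.
-- 'label_count[review] += 1' raises KeyError when review ∉ {0,1}; Pre_ excludes those inputs ('modify' is exact on Pre_).
-- the loop body of A, one sentence: bump label_count, count each token into the bag picked by the label
def pvStepA (st : PySem.Dict String Int × PySem.Dict String Int × PySem.Dict Int Int)
    (sentence : List String × Int) :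
    PySem.Dict String Int × PySem.Dict String Int × PySem.Dict Int Int :=
  let review := sentence.2
  let lc := st.2.2.modify review 0 (· + 1)
  let bows := sentence.1.foldl
    (fun (p : PySem.Dict String Int × PySem.Dict String Int) token =>
      if review = 0 then
        (if p.1.contains token = false then p.1.insert token 1
         else p.1.insert token (p.1.getD token 0 + 1), p.2)
      else if review = 1 then
        (p.1, if p.2.contains token = false then p.2.insert token 1
              else p.2.insert token (p.2.getD token 0 + 1))
      else p) (st.1, st.2.1)
  (bows.1, bows.2, lc)

def create_BOW (corpus : List (List String × Int)) : (List (Int × List (String × Int))) × (List (Int × Int)) :=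
  let st := corpus.foldl pvStepA
    (PySem.Dict.empty, PySem.Dict.empty, (PySem.Dict.empty.insert 0 0).insert 1 0)
  let bag := (PySem.Dict.empty.insert (0 : Int) st.1).insert 1 st.2.1
  (bag.items.map (fun p => (p.1, p.2.items)), st.2.2.items)

-- ===== PORT B =====
-- second pass of Source B: bow[token] = bow.get(token, 0) + 1 over a partitioned token list
def pvCount (toks : List String) : PySem.Dict String Int :=
  toks.foldl (fun d t => d.insert t (d.getD t 0 + 1)) PySem.Dict.empty

-- first pass: partition tokens by label, counting labels ('label_count[review] += 1' as in A; KeyError outside Pre_);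
-- then count each partition.
def create_BOW_alt (corpus : List (List String × Int)) : (List (Int × List (String × Int))) × (List (Int × Int)) :=
  let st := corpus.foldl
    (fun (st : List String × List String × PySem.Dict Int Int) sentence =>
      let review := sentence.2
      let lc := st.2.2.modify review 0 (· + 1)
      if review = 0 then (st.1 ++ sentence.1, st.2.1, lc)
      else (st.1, st.2.1 ++ sentence.1, lc))
    ([], [], (PySem.Dict.empty.insert 0 0).insert 1 0)
  ([(0, (pvCount st.1).items), (1, (pvCount st.2.1).items)], st.2.2.items)

-- ===== PRECONDITION & SPEC =====
-- Pre_ excludes exactly the inputs where A (and B) raise KeyError: a sentence whose label is neither 0 nor 1.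
def Pre_create_BOW (corpus : List (List String × Int)) : Prop :=
  ∀ s ∈ corpus, s.2 = 0 ∨ s.2 = 1
instance (corpus : List (List String × Int)) : Decidable (Pre_create_BOW corpus) := by
  unfold Pre_create_BOW; infer_instance
def pvWitness_create_BOW : (List (List String × Int)) :=
  [(["good", "fun"], 1), (["bad", "bad"], 0), ([], 1)]

def Spec_create_BOW (corpus : List (List String × Int)) (out : (List (Int × List (String × Int))) × (List (Int × Int))) : Prop := out = create_BOW_alt corpus
instance (corpus : List (List String × Int)) (out : (List (Int × List (String × Int))) × (List (Int × Int))) : Decidable (Spec_create_BOW corpus out) := by unfold Spec_create_BOW; infer_instance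

-- ===== CLAIM (what is proved, stated in full; the proofs are below) =====
def Claim_equal_create_BOW : Prop := ∀ (corpus : List (List String × Int)), Dom_create_BOW corpus → Pre_create_BOW corpus → Spec_create_BOW corpus (create_BOW corpus)

-- ===== LEMMAS AND PROOFS =====

-- A's per-token update ('=1' on a fresh key, '+=1' otherwise) is B's counting update.
theorem pvStep_eq (d : PySem.Dict String Int) (t : String) :
    (if d.contains t = false then d.insert t 1 else d.insert t (d.getD t 0 + 1))
      = d.insert t (d.getD t 0 + 1) := by
  by_cases h : d.contains t = false
  · simp [h, PySem.Dict.getD_of_not_contains d (0 : Int) h]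
  · simp [h]

-- the token lists B's first pass accumulates
def pvNeg : List (List String × Int) → List String
  | [] => []
  | s :: r => (if s.2 = 0 then s.1 else []) ++ pvNeg r
def pvPos : List (List String × Int) → List String
  | [] => []
  | s :: r => (if s.2 = 0 then [] else s.1) ++ pvPos r

theorem pvB_fold (corpus : List (List String × Int)) :
    ∀ (na pa : List String) (lc : PySem.Dict Int Int),
    corpus.foldl
      (fun (st : List String × List String × PySem.Dict Int Int) sentence =>
        let review := sentence.2
        let lc := st.2.2.modify review 0 (· + 1)
        if review = 0 then (st.1 ++ sentence.1, st.2.1, lc)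
        else (st.1, st.2.1 ++ sentence.1, lc)) (na, pa, lc)
      = (na ++ pvNeg corpus, pa ++ pvPos corpus,
         corpus.foldl (fun lc s => lc.modify s.2 0 (· + 1)) lc) := by
  induction corpus with
  | nil => intro na pa lc; simp [pvNeg, pvPos]
  | cons s r ih =>
    intro na pa lc
    by_cases h : s.2 = 0 <;>
      simp [h, List.foldl_cons, ih, pvNeg, pvPos, List.append_assoc]

-- A's loop body when the label is 0: only bow_neg changes, by the counting update
theorem pvStepA_zero (sentence : List String × Int) (h0 : sentence.2 = 0)
    (bn bp : PySem.Dict String Int) (lc : PySem.Dict Int Int) :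
    pvStepA (bn, bp, lc) sentence
      = (sentence.1.foldl (fun d t => d.insert t (d.getD t 0 + 1)) bn, bp,
         lc.modify sentence.2 0 (· + 1)) := by
  unfold pvStepA
  simp only [h0, pvStep_eq, if_true]
  rw [PySem.List.foldl_prod_mk
        (f := fun (d : PySem.Dict String Int) t => d.insert t (d.getD t 0 + 1))
        (g := fun (d : PySem.Dict String Int) _ => d)]
  simp [List.foldl_fixed]

-- A's loop body when the label is 1: only bow_pos changes, by the counting update
theorem pvStepA_one (sentence : List String × Int) (h1 : sentence.2 = 1)
    (bn bp : PySem.Dict String Int) (lc : PySem.Dict Int Int) :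
    pvStepA (bn, bp, lc) sentence
      = (bn, sentence.1.foldl (fun d t => d.insert t (d.getD t 0 + 1)) bp,
         lc.modify sentence.2 0 (· + 1)) := by
  unfold pvStepA
  simp only [h1, pvStep_eq, if_true, if_false,
    (by decide : ((1:Int) = 0) = False)]
  rw [PySem.List.foldl_prod_mk
        (f := fun (d : PySem.Dict String Int) _ => d)
        (g := fun (d : PySem.Dict String Int) t => d.insert t (d.getD t 0 + 1))]
  simp [List.foldl_fixed]

-- A's whole loop: the two bags get exactly the per-label token lists counted into them
theorem pvA_fold (corpus : List (List String × Int)) (h : ∀ s ∈ corpus, s.2 = 0 ∨ s.2 = 1) :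
    ∀ (bn bp : PySem.Dict String Int) (lc : PySem.Dict Int Int),
    corpus.foldl pvStepA (bn, bp, lc)
      = ((pvNeg corpus).foldl (fun d t => d.insert t (d.getD t 0 + 1)) bn,
         (pvPos corpus).foldl (fun d t => d.insert t (d.getD t 0 + 1)) bp,
         corpus.foldl (fun lc s => lc.modify s.2 0 (· + 1)) lc) := by
  induction corpus with
  | nil => intro bn bp lc; simp [pvNeg, pvPos]
  | cons s r ih =>
    intro bn bp lc
    have hr : ∀ x ∈ r, x.2 = 0 ∨ x.2 = 1 := fun x hx => h x (List.mem_cons_of_mem s hx)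
    rcases h s (by simp) with h0 | h1
    · rw [List.foldl_cons, pvStepA_zero s h0, ih hr]
      simp [pvNeg, pvPos, h0, List.foldl_append]
    · rw [List.foldl_cons, pvStepA_one s h1, ih hr]
      have h10 : ¬ (s.2 = 0) := by rw [h1]; decide
      simp [pvNeg, pvPos, h10, List.foldl_append]

-- ===== VERDICT (by name: the statement is the Claim_ definition above) =====
theorem create_BOW_spec : Claim_equal_create_BOW := by
  intro corpus _ hpre
  unfold Spec_create_BOW create_BOW create_BOW_alt
  rw [pvA_fold corpus hpre, pvB_fold corpus]
  simp [pvCount, PySem.Dict.items_insert, PySem.Dict.contains_insert]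
  rfl
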